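-- pv_equiv track=rewrite | github.com/jasonbrackman/advent_of_code_2021 | day_03.py | get_gamma_rate
-- ===== SOURCE A (Python) =====
-- def get_gamma_rate(lines):
--     final = [0] * len(lines[0])
--     for line in lines:
--         items = list(line)
--         for index, item in enumerate(items):
--             final[index] += item == "1"
--
--     g = ["1" if f > len(lines) // 2 else "0" for f in final]
--     e = ["0" if f > len(lines) // 2 else "1" for f in final]
--     return int("".join(g), 2), int("".join(e), 2)
-- ===== SOURCE B (Python) =====
-- def get_gamma_rate(lines):
--     half = len(lines) // 2
--     gamma = ""
--     epsilon = ""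
--     for j in range(len(lines[0])):
--         ones = sum(line[j] == "1" for line in lines if j < len(line))
--         if ones > half:
--             gamma += "1"
--             epsilon += "0"
--         else:
--             gamma += "0"
--             epsilon += "1"
--     return int(gamma, 2), int(epsilon, 2)
-- ===== Notes on version B (the rewrite author's own statement) =====
-- stated objective: idiomatic
-- what changed: B drops A's row-wise accumulated count array and the two separate comprehensions: it traverses column-wise, counting each column's ones directly and appending the gamma bit and its complement to both strings in one loop.
import Mathlib
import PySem

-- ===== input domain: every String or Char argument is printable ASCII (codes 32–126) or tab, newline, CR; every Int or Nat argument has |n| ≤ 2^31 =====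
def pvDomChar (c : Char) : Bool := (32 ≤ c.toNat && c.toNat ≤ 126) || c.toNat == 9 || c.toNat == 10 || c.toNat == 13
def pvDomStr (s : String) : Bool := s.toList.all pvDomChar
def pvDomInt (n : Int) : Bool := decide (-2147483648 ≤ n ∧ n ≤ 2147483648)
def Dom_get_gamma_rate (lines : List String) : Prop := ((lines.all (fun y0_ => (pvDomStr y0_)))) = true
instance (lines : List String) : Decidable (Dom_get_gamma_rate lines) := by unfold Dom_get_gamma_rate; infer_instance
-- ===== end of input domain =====

-- B computes each column's '1'-count directly and builds both bit strings in one column-wise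
-- pass, instead of A's row-wise count array plus two comprehensions (objective: idiomatic).

-- ===== PORT A =====
-- hand port of int("".join(bits), 2): exact on the non-empty '0'/'1' strings A feeds it
-- (Pre_ guarantees the joined string is non-empty; on "" Python raises ValueError, excluded by Pre_).
def pvBinInt (l : List Char) : Int :=
  l.foldl (fun a c => a * 2 + (if c = '1' then 1 else 0)) 0

-- the inner 'for index, item in enumerate(items): final[index] += item == "1"'.
-- final[index] out of range is IndexError in Python (excluded by Pre_): getD/set are junk there.
def pvStepA (f : List Int) (line : String) : List Int :=
  (PySem.List.enumerate line.toList 0).foldl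
    (fun g p => g.set p.1.toNat (g.getD p.1.toNat 0 + (if p.2 = '1' then 1 else 0))) f

def get_gamma_rate (lines : List String) : Int × Int :=
  -- lines[0] on [] is IndexError (excluded by Pre_): headD "" is junk there
  let final := lines.foldl pvStepA (List.replicate (lines.headD "").toList.length 0)
  let half : Int := PySem.Int.floordiv (lines.length : Int) 2
  let g := final.map (fun f => if f > half then '1' else '0')
  let e := final.map (fun f => if f > half then '0' else '1')
  (pvBinInt g, pvBinInt e)

-- ===== PORT B =====
-- sum(line[j] == "1" for line in lines if j < len(line)): the guarded index is exactly pyGet?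
def pvOnes (lines : List String) (j : Nat) : Int :=
  lines.foldl (fun s line => s + (if PySem.Str.pyGet? line (j : Int) = some '1' then 1 else 0)) 0

-- int(gamma, 2) / int(epsilon, 2): hand port, exact on the non-empty '0'/'1' strings B builds
-- (Pre_ guarantees range(len(lines[0])) is non-empty; on "" Python raises ValueError, excluded by Pre_).
def get_gamma_rate_alt (lines : List String) : Int × Int :=
  let half : Int := PySem.Int.floordiv (lines.length : Int) 2
  let ge := (List.range (lines.headD "").toList.length).foldl   -- len(lines[0]); IndexError on [] excluded by Pre_
    (fun (p : List Char × List Char) j =>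
      let ones := pvOnes lines j
      if ones > half then (p.1 ++ ['1'], p.2 ++ ['0']) else (p.1 ++ ['0'], p.2 ++ ['1']))
    ([], [])
  (pvBinInt ge.1, pvBinInt ge.2)

-- ===== PRECONDITION & SPEC =====
-- Pre_ excludes exactly the inputs where A raises: [] (IndexError on lines[0]), an empty first
-- line (ValueError from int("",2)), and a line longer than the first (IndexError on final[index]).
def Pre_get_gamma_rate (lines : List String) : Prop :=
  lines ≠ [] ∧ 0 < (lines.headD "").toList.length ∧
    ∀ l ∈ lines, l.toList.length ≤ (lines.headD "").toList.length
instance (lines : List String) : Decidable (Pre_get_gamma_rate lines) := by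
  unfold Pre_get_gamma_rate; infer_instance
def pvWitness_get_gamma_rate : List String := ["10", "01", "11"]

def Spec_get_gamma_rate (lines : List String) (out : Int × Int) : Prop := out = get_gamma_rate_alt lines
instance (lines : List String) (out : Int × Int) : Decidable (Spec_get_gamma_rate lines out) := by unfold Spec_get_gamma_rate; infer_instance

-- ===== CLAIM (what is proved, stated in full; the proofs are below) =====
def Claim_equal_get_gamma_rate : Prop := ∀ (lines : List String), Dom_get_gamma_rate lines → Pre_get_gamma_rate lines → Spec_get_gamma_rate lines (get_gamma_rate lines)

-- ===== LEMMAS AND PROOFS =====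

-- pointwise add of a line's '1'-indicators onto a prefix of the count list
def pvAdd : List Int → List Char → List Int
  | f, [] => f
  | [], _ :: _ => []
  | x :: f, c :: cs => (x + (if c = '1' then 1 else 0)) :: pvAdd f cs

-- column sum of '1'-indicators, recursively
def pvColSum (lines : List String) (j : Nat) : Int :=
  match lines with
  | [] => 0
  | l :: ls => (if l.toList[j]? = some '1' then 1 else 0) + pvColSum ls j

lemma pvStepA_general (cs : List Char) : ∀ (f : List Int) (s : Nat),
    (PySem.List.enumerate cs (s : Int)).foldl
      (fun g p => g.set p.1.toNat (g.getD p.1.toNat 0 + (if p.2 = '1' then 1 else 0))) f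
    = f.take s ++ pvAdd (f.drop s) cs := by
  induction cs with
  | nil => intro f s; simp [PySem.List.enumerate_nil, pvAdd]
  | cons c cs ih =>
    intro f s
    rw [PySem.List.enumerate_cons]
    simp only [List.foldl_cons]
    have hcast : (s : Int) + 1 = ((s + 1 : Nat) : Int) := by push_cast; ring
    rw [hcast, ih]
    simp only [Int.toNat_natCast]
    by_cases h : s < f.length
    · have hset : f.set s (f.getD s 0 + (if c = '1' then 1 else 0))
          = f.take s ++ (f[s] + (if c = '1' then 1 else 0)) :: f.drop (s + 1) := by
        rw [List.getD_eq_getElem f 0 h, List.set_eq_take_append_cons_drop]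
        simp [h]
      have hdrop : f.drop s = f[s] :: f.drop (s + 1) := (List.getElem_cons_drop h).symm
      have hlen : (f.take s).length = s := by simp [Nat.le_of_lt h]
      rw [hset]
      have h1 : List.take (s+1) (f.take s ++ (f[s] + (if c = '1' then 1 else 0)) :: f.drop (s + 1))
          = f.take s ++ [f[s] + (if c = '1' then 1 else 0)] := by
        rw [List.take_append]; simp [hlen]
      have h2 : List.drop (s+1) (f.take s ++ (f[s] + (if c = '1' then 1 else 0)) :: f.drop (s + 1))
          = f.drop (s + 1) := by
        rw [List.drop_append]; simp [hlen]
      rw [h1, h2, hdrop]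
      simp [pvAdd, List.append_assoc]
    · have hge : f.length ≤ s := Nat.le_of_not_lt h
      rw [List.set_eq_of_length_le hge]
      rw [List.take_of_length_le hge, List.take_of_length_le (by omega),
          List.drop_of_length_le hge, List.drop_of_length_le (by omega)]
      cases cs <;> simp [pvAdd]

lemma pvStepA_eq_pvAdd (f : List Int) (line : String) :
    pvStepA f line = pvAdd f line.toList := by
  have := pvStepA_general line.toList f 0
  simpa [pvStepA] using this

lemma length_pvAdd (f : List Int) (cs : List Char) : (pvAdd f cs).length = f.length := by
  induction f generalizing cs with
  | nil => cases cs <;> simp [pvAdd]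
  | cons x f ih => cases cs <;> simp [pvAdd, ih]

lemma getD_pvAdd (f : List Int) (cs : List Char) (h : cs.length ≤ f.length) (j : Nat) :
    (pvAdd f cs).getD j 0 = f.getD j 0 + (if cs[j]? = some '1' then 1 else 0) := by
  induction f generalizing cs j with
  | nil =>
    cases cs with
    | nil => simp [pvAdd]
    | cons c cs => simp at h
  | cons x f ih =>
    cases cs with
    | nil => simp [pvAdd]
    | cons c cs =>
      cases j with
      | zero => simp [pvAdd]
      | succ j => simp only [pvAdd, List.getD_cons_succ, List.getElem?_cons_succ]
                  exact ih cs (by simpa using h) j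

lemma foldl_pvAdd_getD (lines : List String) : ∀ (f : List Int),
    (∀ l ∈ lines, l.toList.length ≤ f.length) → ∀ j : Nat,
    (lines.foldl (fun g line => pvAdd g line.toList) f).getD j 0 = f.getD j 0 + pvColSum lines j := by
  induction lines with
  | nil => intro f _ j; simp [pvColSum]
  | cons l ls ih =>
    intro f hf j
    simp only [List.foldl_cons]
    rw [ih (pvAdd f l.toList)
        (fun x hx => by rw [length_pvAdd]; exact hf x (List.mem_cons_of_mem _ hx)) j,
        getD_pvAdd f l.toList (hf l (List.mem_cons_self)) j]
    simp [pvColSum]; ring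

lemma foldl_pvAdd_length (lines : List String) : ∀ (f : List Int),
    (lines.foldl (fun g line => pvAdd g line.toList) f).length = f.length := by
  induction lines with
  | nil => intro f; rfl
  | cons l ls ih => intro f; simp only [List.foldl_cons]; rw [ih, length_pvAdd]

lemma pvOnes_shift (lines : List String) (j : Nat) : ∀ (a : Int),
    lines.foldl (fun s line => s + (if PySem.Str.pyGet? line (j : Int) = some '1' then 1 else 0)) a
    = a + pvColSum lines j := by
  induction lines with
  | nil => intro a; simp [pvColSum]
  | cons l ls ih =>
    intro a
    simp only [List.foldl_cons, pvColSum]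
    rw [ih]
    simp
    ring

lemma pvOnes_eq_colSum (lines : List String) (j : Nat) : pvOnes lines j = pvColSum lines j := by
  rw [pvOnes]; simpa using pvOnes_shift lines j 0

lemma foldl_pair_append (xs : List Nat) (P : Nat → Prop) [DecidablePred P] : ∀ (a b : List Char),
    xs.foldl (fun (p : List Char × List Char) j =>
        if P j then (p.1 ++ ['1'], p.2 ++ ['0']) else (p.1 ++ ['0'], p.2 ++ ['1'])) (a, b)
    = (a ++ xs.map (fun j => if P j then '1' else '0'),
       b ++ xs.map (fun j => if P j then '0' else '1')) := by
  induction xs with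
  | nil => intro a b; simp
  | cons x xs ih =>
    intro a b
    simp only [List.foldl_cons, List.map_cons]
    by_cases hx : P x <;> simp [hx, ih]

lemma final_eq_map (lines : List String) (h : ∀ l ∈ lines, l.toList.length ≤ (lines.headD "").toList.length) :
    lines.foldl pvStepA (List.replicate (lines.headD "").toList.length 0)
    = (List.range (lines.headD "").toList.length).map (fun j => pvColSum lines j) := by
  set W := (lines.headD "").toList.length with hW
  have hfold : lines.foldl pvStepA (List.replicate W 0)
      = lines.foldl (fun g line => pvAdd g line.toList) (List.replicate W 0) := by
    have : pvStepA = fun g line => pvAdd g line.toList := by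
      funext g line; exact pvStepA_eq_pvAdd g line
    rw [this]
  rw [hfold]
  apply List.ext_getElem
  · rw [foldl_pvAdd_length]; simp
  · intro j hj hj'
    have hjW : j < W := by
      have := foldl_pvAdd_length lines (List.replicate W 0)
      simp [this] at hj; simpa using hj
    rw [← List.getD_eq_getElem _ 0 hj, ← List.getD_eq_getElem _ 0 hj']
    rw [foldl_pvAdd_getD lines (List.replicate W 0) (by simpa using h) j]
    simp [List.getD_eq_getElem?_getD, hjW]

-- ===== VERDICT (by name: the statement is the Claim_ definition above) =====
theorem get_gamma_rate_spec : Claim_equal_get_gamma_rate := by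
  intro lines _ hpre
  obtain ⟨hne, hpos, hlen⟩ := hpre
  simp only [Spec_get_gamma_rate, get_gamma_rate, get_gamma_rate_alt]
  rw [final_eq_map lines hlen, List.map_map, List.map_map,
      foldl_pair_append (List.range (lines.headD "").toList.length)
        (fun j => pvOnes lines j > PySem.Int.floordiv (lines.length : Int) 2) [] []]
  simp [Function.comp_def, pvOnes_eq_colSum]
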